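-- pv_equiv track=rewrite | github.com/chou-ting-wei/NYCU_Cryptography-Engineering | final_project/codes/substitution.py | generate_cipher
-- ===== SOURCE A (Python) =====
-- import string
--
-- def generate_cipher(cypher:str) -> str:
--     char_count = {x:0 for x in string.ascii_uppercase}
--     for c in cypher:
--         if c not in string.ascii_uppercase:
--             continue
--         if c in char_count:
--             char_count[c]+=1
--         else:
--             char_count[c]=1
--     sorted_char_count = sorted(char_count.items(),key=lambda x:x[1],reverse=True)
--     common_chars = "EARIOTNSLCUDPMHGBFYWKVXZJQ"
--     char_pairs = list(zip(common_chars,sorted_char_count))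
--     sorted_char_pair = sorted(char_pairs,key=lambda x:x[1][0])
--     return ''.join([x[0] for x in sorted_char_pair])
-- ===== SOURCE B (Python) =====
-- def generate_cipher(cypher: str) -> str:
--     # Counting sort by letter frequency: bucket the 26 letters by their count,
--     # then walk the buckets from the highest count down, handing out the common
--     # English letters in order; within a bucket letters come already in A-Z
--     # order, which reproduces the stable tie-break of a descending sort.
--     counts = [0] * 26
--     for ch in cypher:
--         k = ord(ch) - 65
--         if 0 <= k < 26:
--             counts[k] += 1
--     m = max(counts)
--     buckets = [[] for _ in range(m + 1)]
--     for k in range(26):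
--         buckets[counts[k]].append(k)
--     common = "EARIOTNSLCUDPMHGBFYWKVXZJQ"
--     out = [''] * 26
--     rank = 0
--     for n in range(m, -1, -1):
--         for k in buckets[n]:
--             out[k] = common[rank]
--             rank += 1
--     return ''.join(out)
-- ===== Notes on version B (the rewrite author's own statement) =====
-- stated objective: alternative
-- what changed: B replaces A's two comparison sorts (sort dict items by count descending, then re-sort the zipped pairs by letter) with a counting sort: it tallies into a 26-cell array, buckets the letters by their count, walks the buckets from the highest count down handing out the common letters, and scatters each directly into its alphabet slot.
import Mathlib
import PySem

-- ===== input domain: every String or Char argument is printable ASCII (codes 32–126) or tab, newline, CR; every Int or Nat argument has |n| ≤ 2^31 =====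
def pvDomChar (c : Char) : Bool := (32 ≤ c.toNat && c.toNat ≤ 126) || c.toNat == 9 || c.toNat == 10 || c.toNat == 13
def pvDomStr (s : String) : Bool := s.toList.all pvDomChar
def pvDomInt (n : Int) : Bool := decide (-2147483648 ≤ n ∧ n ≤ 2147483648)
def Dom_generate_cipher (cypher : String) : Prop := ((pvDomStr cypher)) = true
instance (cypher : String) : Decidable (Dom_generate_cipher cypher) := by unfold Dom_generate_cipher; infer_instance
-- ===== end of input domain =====

-- B replaces A's two comparison sorts (by count, then again by letter) with a counting
-- sort: bucket the letters by count, walk buckets from the highest count down handing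
-- out the common letters, scattering each into its alphabet slot (objective: alternative).

-- "EARIOTNSLCUDPMHGBFYWKVXZJQ" (shared literal constant)
def pvCommon : List Char := ['E','A','R','I','O','T','N','S','L','C','U','D','P','M','H','G','B','F','Y','W','K','V','X','Z','J','Q']

-- string.ascii_uppercase (constant of A)
def pvLetters : List Char := ['A','B','C','D','E','F','G','H','I','J','K','L','M','N','O','P','Q','R','S','T','U','V','W','X','Y','Z']

-- ===== PORT A =====
def generate_cipher (cypher : String) : String :=
  -- char_count = {x:0 for x in string.ascii_uppercase}
  let char_count0 : PySem.Dict Char Int :=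
    pvLetters.foldl (fun d x => d.insert x 0) PySem.Dict.empty
  -- for c in cypher: if c not in string.ascii_uppercase: continue; if c in char_count: char_count[c]+=1 else: char_count[c]=1
  -- ('c not in string.ascii_uppercase' on a single character is exactly list membership)
  let char_count : PySem.Dict Char Int :=
    cypher.toList.foldl (fun d c =>
      if c ∉ pvLetters then d
      else if d.contains c then d.insert c (d.getD c 0 + 1)
      else d.insert c 1) char_count0
  let sorted_char_count := PySem.List.sorted char_count.items (fun x => x.2) true
  let common_chars : List Char := pvCommon
  let char_pairs := common_chars.zip sorted_char_count
  let sorted_char_pair := PySem.List.sorted char_pairs (fun x => x.2.1) false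
  -- ''.join([x[0] for x in sorted_char_pair])  (each x[0] is one character)
  String.ofList (sorted_char_pair.map (fun x => x.1))

-- ===== PORT B =====
def generate_cipher_alt (cypher : String) : String :=
  -- counts = [0]*26; for ch in cypher: k = ord(ch)-65; if 0 <= k < 26: counts[k] += 1
  let counts : List Int :=
    cypher.toList.foldl (fun acc ch =>
      let k : Int := (ch.toNat : Int) - 65
      if 0 ≤ k ∧ k < 26 then PySem.List.pySetD acc k (PySem.List.pyGetD acc k 0 + 1)
      else acc) (List.replicate 26 (0 : Int))
  -- m = max(counts)  (counts is never empty, so Python's max returns; the .getD is dead)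
  let m : Int := (PySem.List.max? counts (fun x => x)).getD 0
  -- buckets = [[] for _ in range(m + 1)]
  let buckets0 : List (List Int) := (PySem.List.pyRange 0 (m + 1) 1).map (fun _ => ([] : List Int))
  -- for k in range(26): buckets[counts[k]].append(k)
  let buckets : List (List Int) :=
    (PySem.List.pyRange 0 26 1).foldl (fun bs k =>
      let n := PySem.List.pyGetD counts k 0
      PySem.List.pySetD bs n (PySem.List.pyGetD bs n [] ++ [k])) buckets0
  let common : List Char := pvCommon
  -- out = ['']*26; rank = 0; for n in range(m,-1,-1): for k in buckets[n]: out[k] = common[rank]; rank += 1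
  let fin : List (List Char) × Int :=
    (PySem.List.pyRange m (-1) (-1)).foldl (fun st n =>
      (PySem.List.pyGetD buckets n []).foldl (fun st k =>
        (PySem.List.pySetD st.1 k [PySem.List.pyGetD common st.2 'A'], st.2 + 1)) st)
      (List.replicate 26 ([] : List Char), 0)
  -- ''.join(out)
  String.ofList fin.1.flatten

-- ===== PRECONDITION & SPEC =====
def Spec_generate_cipher (cypher : String) (out : String) : Prop := out = generate_cipher_alt cypher
instance (cypher : String) (out : String) : Decidable (Spec_generate_cipher cypher out) := by unfold Spec_generate_cipher; infer_instance

-- ===== CLAIM (what is proved, stated in full; the proofs are below) =====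
def Claim_equal_generate_cipher : Prop := ∀ (cypher : String), Dom_generate_cipher cypher → Spec_generate_cipher cypher (generate_cipher cypher)

-- ===== LEMMAS AND PROOFS =====

-- the j-th uppercase letter
def pvChar (j : Nat) : Char := pvLetters.getD j 'A'

-- the count B keeps for letter-index k
def pvCnt (cs : List Char) (k : Int) : Int := ((cs.count (pvChar k.toNat) : Nat) : Int)

-- the sorted pair list A builds (count descending, stable)
def pvRs (cs : List Char) : List (Char × Int) :=
  PySem.List.sorted (pvLetters.map (fun x => (x, (cs.count x : Int)))) (fun p => p.2) true

-- strict order: count descending, letter ascending on ties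
def pvR (a b : Char × Int) : Prop := b.2 < a.2 ∨ (a.2 = b.2 ∧ a.1 < b.1)

-- B's visiting order of letter indices: buckets from the highest count down
def pvYs (cs : List Char) (m : Int) : List Int :=
  (PySem.List.pyRange m (-1) (-1)).flatMap
    (fun n => (PySem.List.pyRange 0 26 1).filter (fun k => pvCnt cs k == n))

-- ---------- small letter facts ----------

set_option maxRecDepth 4000 in
lemma pvLetters_nodup : pvLetters.Nodup := by decide

set_option maxRecDepth 4000 in
lemma pvLetters_eq_map_range : pvLetters = (List.range 26).map pvChar := by decide

set_option maxRecDepth 4000 in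
lemma pv_pairwise_lt : pvLetters.Pairwise (· < ·) := by decide

set_option maxRecDepth 4000 in
lemma pvChar_inj : ∀ i < 26, ∀ j < 26, pvChar i = pvChar j → i = j := by decide

set_option maxRecDepth 4000 in
lemma pvChar_lt : ∀ i < 26, ∀ j < 26, i < j → pvChar i < pvChar j := by decide

set_option maxRecDepth 4000 in
lemma pvChar_toNat : ∀ j < 26, (pvChar j).toNat = 65 + j := by decide

set_option maxRecDepth 4000 in
lemma pv_ofNat : ∀ j < 26, Char.ofNat (65 + j) = pvChar j := by decide

-- ---------- A's counting loop gives List.count over A-Z ----------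

def pvStepA (d : PySem.Dict Char Int) (c : Char) : PySem.Dict Char Int :=
  if c ∉ pvLetters then d
  else if d.contains c then d.insert c (d.getD c 0 + 1)
  else d.insert c 1

lemma pvStepA_eq (d : PySem.Dict Char Int) (y : Char)
    (h : ∀ c ∈ pvLetters, d.contains c = true) :
    pvStepA d y = if y ∈ pvLetters then d.insert y (d.getD y 0 + 1) else d := by
  unfold pvStepA
  by_cases hy : y ∈ pvLetters
  · simp [hy, h y hy]
  · simp [hy]

lemma stepA_contains (d : PySem.Dict Char Int) (y : Char)
    (h : ∀ c ∈ pvLetters, d.contains c = true) :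
    ∀ c ∈ pvLetters, (pvStepA d y).contains c = true := by
  intro c hc
  rw [pvStepA_eq d y h]
  by_cases hy : y ∈ pvLetters
  · rw [if_pos hy, PySem.Dict.contains_insert]; simp [h c hc]
  · rw [if_neg hy]; exact h c hc

lemma loopA_keys (l : List Char) (d : PySem.Dict Char Int)
    (h : ∀ c ∈ pvLetters, d.contains c = true) :
    (l.foldl pvStepA d).keys = d.keys := by
  induction l generalizing d with
  | nil => rfl
  | cons x t ih =>
    simp only [List.foldl_cons]
    rw [ih _ (stepA_contains d x h), pvStepA_eq d x h]
    by_cases hx : x ∈ pvLetters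
    · rw [if_pos hx]
      exact PySem.Dict.keys_insert_of_contains d _ (h x hx)
    · rw [if_neg hx]

lemma loopA_getD (l : List Char) (d : PySem.Dict Char Int)
    (h : ∀ c ∈ pvLetters, d.contains c = true) (x : Char) (hx : x ∈ pvLetters) :
    (l.foldl pvStepA d).getD x 0 = d.getD x 0 + (l.count x : Int) := by
  induction l generalizing d with
  | nil => simp
  | cons y t ih =>
    simp only [List.foldl_cons, List.count_cons]
    by_cases hy : y ∈ pvLetters
    · have hstep : pvStepA d y = d.insert y (d.getD y 0 + 1) := by
        rw [pvStepA_eq d y h, if_pos hy]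
      rw [hstep, ih _ (fun c hc => hstep ▸ stepA_contains d y h c hc)]
      rw [PySem.Dict.getD_insert]
      by_cases hxy : x = y
      · subst hxy; simp; omega
      · have : (y == x) = false := by
          rw [beq_eq_false_iff_ne]; exact fun h' => hxy h'.symm
        simp [hxy, this]
    · have hstep : pvStepA d y = d := by rw [pvStepA_eq d y h, if_neg hy]
      have hxy : (y == x) = false := by
        simp only [beq_eq_false_iff_ne, ne_eq]
        intro h'; exact hy (h' ▸ hx)
      rw [hstep, ih d h, hxy]
      simp

set_option maxRecDepth 4000 in
lemma d0_keys : (pvLetters.foldl (fun d x => d.insert x 0) (PySem.Dict.empty : PySem.Dict Char Int)).keys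
    = pvLetters := by decide

set_option maxRecDepth 4000 in
lemma d0_getD : ∀ x ∈ pvLetters,
    (pvLetters.foldl (fun d x => d.insert x 0) (PySem.Dict.empty : PySem.Dict Char Int)).getD x 0 = 0 := by
  intro x hx
  exact of_decide_eq_true (List.all_eq_true.1
    (show pvLetters.all
        (fun x => decide ((pvLetters.foldl (fun d x => d.insert x 0)
          (PySem.Dict.empty : PySem.Dict Char Int)).getD x 0 = 0)) = true
      by decide) x hx)

-- A's filled dict lists exactly (letter, multiplicity) over A-Z
lemma charCount_items (cs : List Char) :
    ((cs.foldl pvStepA (pvLetters.foldl (fun d x => d.insert x 0) PySem.Dict.empty)).items)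
      = pvLetters.map (fun x => (x, (cs.count x : Int))) := by
  set d0 : PySem.Dict Char Int := pvLetters.foldl (fun d x => d.insert x 0) PySem.Dict.empty with hd0
  have hcont : ∀ c ∈ pvLetters, d0.contains c = true := by
    intro c hc
    rw [PySem.Dict.contains_iff_mem_keys, d0_keys]
    exact hc
  have hkeys : (cs.foldl pvStepA d0).keys = pvLetters := by
    rw [loopA_keys cs d0 hcont, d0_keys]
  have hnd : (cs.foldl pvStepA d0).keys.Nodup := by rw [hkeys]; exact pvLetters_nodup
  rw [PySem.Dict.items_eq_map_keys _ hnd 0, hkeys]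
  apply List.map_congr_left
  intro x hx
  rw [loopA_getD cs d0 hcont x hx, d0_getD x hx]
  simp

-- ---------- A's second sort: the letter-indexed rearrangement ----------

def pvIdx (rs : List (Char × Int)) (c : Char) : Nat := List.idxOf c (rs.map Prod.fst)

lemma ranked_facts (cs : List Char) :
    ((pvRs cs).map Prod.fst).Perm pvLetters ∧ ((pvRs cs).map Prod.fst).Nodup ∧
      (∀ p ∈ pvRs cs, p.1 ∈ pvLetters ∧ p.2 = (cs.count p.1 : Int)) := by
  have hperm : (pvRs cs).Perm (pvLetters.map (fun x => (x, (cs.count x : Int)))) :=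
    PySem.List.sorted_perm _ _ _
  have hfst : ((pvRs cs).map Prod.fst).Perm pvLetters := by
    have := hperm.map Prod.fst
    simpa [List.map_map, Function.comp] using this
  refine ⟨hfst, (hfst.nodup_iff).2 pvLetters_nodup, ?_⟩
  intro p hp
  have : p ∈ pvLetters.map (fun x => (x, (cs.count x : Int))) := hperm.mem_iff.1 hp
  obtain ⟨x, hx, hpx⟩ := List.mem_map.1 this
  cases hpx
  exact ⟨hx, rfl⟩

lemma pvIdx_lt (cs : List Char) (c : Char) (hc : c ∈ pvLetters) : pvIdx (pvRs cs) c < 26 := by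
  have hlen : (pvRs cs).length = 26 := by
    rw [pvRs, PySem.List.length_sorted, List.length_map]; rfl
  have hmem : c ∈ (pvRs cs).map Prod.fst := (ranked_facts cs).1.mem_iff.2 hc
  have := List.idxOf_lt_length_iff.2 hmem
  simpa [pvIdx, hlen] using this

lemma pvIdx_getElem (rs : List (Char × Int)) (c : Char)
    (h : pvIdx rs c < (rs.map Prod.fst).length) :
    (rs.map Prod.fst)[pvIdx rs c] = c :=
  List.getElem_idxOf h

lemma ranked_getElem_idx (cs : List Char)
    (c : Char) (_hc : c ∈ pvLetters) (h : pvIdx (pvRs cs) c < (pvRs cs).length) :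
    (pvRs cs)[pvIdx (pvRs cs) c] = (c, (cs.count c : Int)) := by
  obtain ⟨hperm, hnd, hpair⟩ := ranked_facts cs
  have hfst : (pvRs cs)[pvIdx (pvRs cs) c].1 = c := by
    have := pvIdx_getElem (pvRs cs) c (by simpa using h)
    simpa using this
  have := hpair (pvRs cs)[pvIdx (pvRs cs) c] (List.getElem_mem h)
  have h2 := this.2
  rw [hfst] at h2
  exact Prod.ext hfst h2

-- a nodup list of 26 naturals all below 26 is a permutation of range 26
lemma perm_range_of_nodup (l : List Nat) (hlen : l.length = 26) (hnd : l.Nodup)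
    (hlt : ∀ x ∈ l, x < 26) : l.Perm (List.range 26) := by
  apply List.perm_of_nodup_nodup_toFinset_eq hnd (List.nodup_range)
  rw [List.toFinset_range]
  apply Finset.eq_of_subset_of_card_le
  · intro x hx
    rw [List.mem_toFinset] at hx
    exact Finset.mem_range.2 (hlt x hx)
  · rw [Finset.card_range, List.toFinset_card_of_nodup hnd, hlen]

-- A's whole pipeline, as a map over the alphabet
set_option maxHeartbeats 1000000 in
lemma A_form (cypher : String) :
    generate_cipher cypher
      = String.ofList (pvLetters.map (fun c => pvCommon.getD (pvIdx (pvRs cypher.toList) c) 'A')) := by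
  simp only [generate_cipher]
  set cs := cypher.toList with hcs
  have hitems :
      (cs.foldl (fun d c =>
          if c ∉ pvLetters then d
          else if d.contains c then d.insert c (d.getD c 0 + 1)
          else d.insert c 1) (pvLetters.foldl (fun d x => d.insert x 0) PySem.Dict.empty)).items
        = pvLetters.map (fun x => (x, (cs.count x : Int))) := charCount_items cs
  rw [hitems]
  show String.ofList
      ((PySem.List.sorted (pvCommon.zip (pvRs cs)) (fun x => x.2.1) false).map (fun x => x.1)) = _
  set rs := pvRs cs with hrsdef
  obtain ⟨hperm, hnd, hpair⟩ := ranked_facts cs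
  have hlen : rs.length = 26 := by
    rw [hrsdef, pvRs, PySem.List.length_sorted, List.length_map]; rfl
  have hcommonlen : pvCommon.length = 26 := rfl
  have hzip : pvCommon.zip rs
      = (List.range 26).map (fun i => (pvCommon.getD i 'A', rs.getD i ('A', 0))) := by
    apply List.ext_getElem
    · simp [hlen, hcommonlen]
    · intro i h1 h2
      have hi : i < 26 := by simpa using h2
      rw [List.getElem_zip, List.getElem_map, List.getElem_range,
        List.getD_eq_getElem _ _ (by omega : i < pvCommon.length),
        List.getD_eq_getElem _ _ (by omega : i < rs.length)]
  have hidxlt : ∀ c ∈ pvLetters, pvIdx rs c < 26 := fun c hc => pvIdx_lt cs c hc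
  have hgetidx : ∀ c ∈ pvLetters, rs.getD (pvIdx rs c) ('A', 0) = (c, (cs.count c : Int)) := by
    intro c hc
    have h1 : pvIdx rs c < rs.length := by rw [hlen]; exact hidxlt c hc
    rw [List.getD_eq_getElem _ _ h1]
    exact ranked_getElem_idx cs c hc h1
  have hys : pvLetters.map (fun c => (pvCommon.getD (pvIdx rs c) 'A', (c, (cs.count c : Int))))
      = (pvLetters.map (fun c => pvIdx rs c)).map
          (fun i => (pvCommon.getD i 'A', rs.getD i ('A', 0))) := by
    rw [List.map_map]
    apply List.map_congr_left
    intro c hc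
    simp only [Function.comp]
    rw [hgetidx c hc]
  have hidxnodup : (pvLetters.map (fun c => pvIdx rs c)).Nodup := by
    apply List.Nodup.map_on _ pvLetters_nodup
    intro x hx y hy hxy
    have hx1 : pvIdx rs x < (rs.map Prod.fst).length := by
      simpa [hlen] using hidxlt x hx
    have hy1 : pvIdx rs y < (rs.map Prod.fst).length := by
      simpa [hlen] using hidxlt y hy
    rw [← pvIdx_getElem rs x hx1, ← pvIdx_getElem rs y hy1]
    congr 1
  have hpermidx : (pvLetters.map (fun c => pvIdx rs c)).Perm (List.range 26) := by
    apply perm_range_of_nodup _ (by rw [List.length_map]; rfl) hidxnodup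
    intro x hx
    obtain ⟨c, hc, hcx⟩ := List.mem_map.1 hx
    exact hcx ▸ hidxlt c hc
  have hsorted2 : PySem.List.sorted (pvCommon.zip rs) (fun x => x.2.1) false
      = pvLetters.map (fun c => (pvCommon.getD (pvIdx rs c) 'A', (c, (cs.count c : Int)))) := by
    apply PySem.List.sorted_eq_of_perm_of_pairwise_lt
    · rw [hys, hzip]
      exact hpermidx.map _
    · rw [List.pairwise_map]
      exact pv_pairwise_lt
  rw [hsorted2, List.map_map]
  simp only [Function.comp_def]

-- ---------- stability: A's descending sort is pairwise in the strict order pvR ----------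

lemma insertBy_pairwise (x : Char × Int) (acc : List (Char × Int))
    (hacc : acc.Pairwise pvR) (hlt : ∀ y ∈ acc, y.1 < x.1) :
    (PySem.List.insertBy (fun a b => decide (b.2 < a.2)) x acc).Pairwise pvR := by
  induction acc with
  | nil => simp [PySem.List.insertBy]
  | cons y t ih =>
    by_cases hxy : y.2 < x.2
    · rw [show PySem.List.insertBy (fun a b => decide (b.2 < a.2)) x (y :: t) = x :: y :: t from by
        simp [PySem.List.insertBy, hxy]]
      refine List.pairwise_cons.2 ⟨?_, hacc⟩
      intro z hz
      rcases List.mem_cons.1 hz with h | h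
      · subst h; exact Or.inl hxy
      · rcases (List.pairwise_cons.1 hacc).1 z h with h2 | h2
        · exact Or.inl (h2.trans hxy)
        · exact Or.inl (h2.1 ▸ hxy)
    · rw [show PySem.List.insertBy (fun a b => decide (b.2 < a.2)) x (y :: t)
          = y :: PySem.List.insertBy (fun a b => decide (b.2 < a.2)) x t from by
        simp [PySem.List.insertBy, hxy]]
      refine List.pairwise_cons.2 ⟨?_, ih (List.pairwise_cons.1 hacc).2
        (fun z hz => hlt z (List.mem_cons_of_mem _ hz))⟩
      intro z hz
      rcases (PySem.List.mem_insertBy _ _ _ _).1 hz with h | h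
      · subst h
        rcases lt_or_eq_of_le (le_of_not_gt hxy) with h2 | h2
        · exact Or.inl h2
        · exact Or.inr ⟨h2.symm, hlt y List.mem_cons_self⟩
      · exact (List.pairwise_cons.1 hacc).1 z h

lemma foldl_insertBy_pairwise (l : List (Char × Int)) :
    ∀ (acc : List (Char × Int)), l.Pairwise (fun a b => a.1 < b.1) → acc.Pairwise pvR →
    (∀ y ∈ acc, ∀ x ∈ l, y.1 < x.1) →
    (l.foldl (fun acc x => PySem.List.insertBy (fun a b => decide (b.2 < a.2)) x acc) acc).Pairwise pvR := by
  induction l with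
  | nil => intro acc _ hacc _; exact hacc
  | cons x t ih =>
    intro acc hl hacc hcross
    simp only [List.foldl_cons]
    refine ih _ hl.tail
      (insertBy_pairwise x acc hacc (fun y hy => hcross y hy x List.mem_cons_self)) ?_
    intro y hy z hz
    rcases (PySem.List.mem_insertBy _ _ _ _).1 hy with h | h
    · subst h; exact (List.pairwise_cons.1 hl).1 z hz
    · exact hcross y h z (List.mem_cons_of_mem _ hz)

lemma rs_pairwise (cs : List Char) : (pvRs cs).Pairwise pvR := by
  rw [pvRs, PySem.List.sorted_rev_eq_foldl_insertBy]
  refine foldl_insertBy_pairwise _ _ ?_ List.Pairwise.nil (by simp)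
  rw [List.pairwise_map]
  exact pv_pairwise_lt

-- ---------- B's counting loop ----------

-- the 26 counts as a literal list
def pvCounts (cs : List Char) : List Int := (List.range 26).map (fun j => ((cs.count (pvChar j) : Nat) : Int))

-- m = max(counts)
def pvM (cs : List Char) : Int := (PySem.List.max? (pvCounts cs) (fun x => x)).getD 0

lemma char_eq_pvChar (c : Char) (h1 : 65 ≤ c.toNat) (h2 : c.toNat ≤ 90) :
    c = pvChar (c.toNat - 65) := by
  have hk : c.toNat - 65 < 26 := by omega
  have h65 : 65 + (c.toNat - 65) = c.toNat := by omega
  rw [← pv_ofNat _ hk, h65, Char.ofNat_toNat]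

lemma counts_len (cs : List Char) (acc : List Int) :
    (cs.foldl (fun acc ch =>
      if 0 ≤ (ch.toNat : Int) - 65 ∧ (ch.toNat : Int) - 65 < 26
      then PySem.List.pySetD acc ((ch.toNat : Int) - 65)
        (PySem.List.pyGetD acc ((ch.toNat : Int) - 65) 0 + 1)
      else acc) acc).length = acc.length := by
  induction cs generalizing acc with
  | nil => rfl
  | cons ch t ih =>
    simp only [List.foldl_cons]
    rw [ih]
    split_ifs with h
    · rw [PySem.List.length_pySetD]
    · rfl

lemma counts_getD (cs : List Char) (acc : List Int) (hacc : acc.length = 26)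
    (j : Nat) (hj : j < 26) :
    (cs.foldl (fun acc ch =>
      if 0 ≤ (ch.toNat : Int) - 65 ∧ (ch.toNat : Int) - 65 < 26
      then PySem.List.pySetD acc ((ch.toNat : Int) - 65)
        (PySem.List.pyGetD acc ((ch.toNat : Int) - 65) 0 + 1)
      else acc) acc).getD j 0 = acc.getD j 0 + ((cs.count (pvChar j) : Nat) : Int) := by
  induction cs generalizing acc with
  | nil => simp
  | cons ch t ih =>
    simp only [List.foldl_cons, List.count_cons]
    by_cases h : 0 ≤ (ch.toNat : Int) - 65 ∧ (ch.toNat : Int) - 65 < 26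
    · rw [if_pos h]
      have hrange : 65 ≤ ch.toNat ∧ ch.toNat ≤ 90 := by omega
      have hch : ch = pvChar (ch.toNat - 65) := char_eq_pvChar ch hrange.1 hrange.2
      have hset : PySem.List.pySetD acc ((ch.toNat : Int) - 65)
            (PySem.List.pyGetD acc ((ch.toNat : Int) - 65) 0 + 1)
          = acc.set (ch.toNat - 65) (acc.getD (ch.toNat - 65) 0 + 1) := by
        rw [PySem.List.pySetD_of_nonneg _ _ h.1, PySem.List.pyGetD_of_nonneg _ _ h.1]
        have : ((ch.toNat : Int) - 65).toNat = ch.toNat - 65 := by omega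
        rw [this]
      rw [hset, ih _ (by rw [List.length_set]; exact hacc) ]
      by_cases hjc : j = ch.toNat - 65
      · subst hjc
        have hlt : ch.toNat - 65 < acc.length := by omega
        have hgd : (acc.set (ch.toNat - 65) (acc.getD (ch.toNat - 65) 0 + 1)).getD (ch.toNat - 65) 0
            = acc.getD (ch.toNat - 65) 0 + 1 := by
          rw [List.getD_eq_getElem _ _ (by rw [List.length_set]; exact hlt)]
          exact List.getElem_set_self _
        have hbeq : (ch == pvChar (ch.toNat - 65)) = true := by
          rw [beq_iff_eq]; exact hch
        rw [hgd, hbeq]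
        simp only [if_true]
        push_cast
        ring
      · have hne : (ch == pvChar j) = false := by
          rw [beq_eq_false_iff_ne]
          intro h'
          apply hjc
          have := congrArg Char.toNat h'
          rw [pvChar_toNat j hj] at this
          omega
        have hlt : j < acc.length := by omega
        have hgd : (acc.set (ch.toNat - 65) (acc.getD (ch.toNat - 65) 0 + 1)).getD j 0
            = acc.getD j 0 := by
          rw [List.getD_eq_getElem _ _ (by rw [List.length_set]; exact hlt),
            List.getElem_set_ne (by omega), ← List.getD_eq_getElem _ _ hlt]
        rw [hgd, hne]
        simp
    · rw [if_neg h, ih _ hacc]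
      have hne : (ch == pvChar j) = false := by
        rw [beq_eq_false_iff_ne]
        intro h'
        have := congrArg Char.toNat h'
        rw [pvChar_toNat j hj] at this
        omega
      rw [hne]
      simp

lemma counts_eq (cs : List Char) :
    cs.foldl (fun acc ch =>
      if 0 ≤ (ch.toNat : Int) - 65 ∧ (ch.toNat : Int) - 65 < 26
      then PySem.List.pySetD acc ((ch.toNat : Int) - 65)
        (PySem.List.pyGetD acc ((ch.toNat : Int) - 65) 0 + 1)
      else acc) (List.replicate 26 (0 : Int)) = pvCounts cs := by
  apply List.ext_getElem
  · rw [counts_len, List.length_replicate, pvCounts, List.length_map, List.length_range]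
  · intro j h1 h2
    have hj : j < 26 := by
      simpa [pvCounts] using h2
    have hrep : (List.replicate 26 (0 : Int)).getD j 0 = 0 := by
      rw [List.getD_eq_getElem _ _ (by simpa using hj), List.getElem_replicate]
    rw [← List.getD_eq_getElem _ (0 : Int) h1, counts_getD cs _ (by simp) j hj, hrep]
    unfold pvCounts
    rw [List.getElem_map, List.getElem_range]
    simp

lemma pvCounts_len (cs : List Char) : (pvCounts cs).length = 26 := by
  unfold pvCounts; simp

lemma pvM_facts (cs : List Char) : 0 ≤ pvM cs ∧ ∀ y ∈ pvCounts cs, y ≤ pvM cs := by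
  obtain ⟨m, hm⟩ : ∃ m, PySem.List.max? (pvCounts cs) (fun x => x) = some m := by
    cases hmx : PySem.List.max? (pvCounts cs) (fun x => x) with
    | none =>
      exfalso
      have h0 := (PySem.List.max?_eq_none_iff _ _).1 hmx
      have := pvCounts_len cs
      rw [h0] at this
      simp at this
    | some m => exact ⟨m, rfl⟩
  have hM : pvM cs = m := by rw [pvM, hm]; rfl
  constructor
  · have hmem := PySem.List.max?_mem hm
    unfold pvCounts at hmem
    obtain ⟨j, hj, hjm⟩ := List.mem_map.1 hmem
    rw [hM]
    omega
  · intro y hy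
    rw [hM]
    exact PySem.List.max?_isMax hm y hy

-- ---------- B's bucket loop ----------

lemma bucket_fold (g : Int → Int) (ks : List Int) (bs : List (List Int))
    (hg : ∀ k ∈ ks, 0 ≤ g k ∧ g k < (bs.length : Int)) (n : Int) (hn : 0 ≤ n) :
    PySem.List.pyGetD (ks.foldl (fun bs k =>
        PySem.List.pySetD bs (g k) (PySem.List.pyGetD bs (g k) [] ++ [k])) bs) n []
      = PySem.List.pyGetD bs n [] ++ ks.filter (fun k => g k == n) := by
  induction ks generalizing bs with
  | nil => simp
  | cons k t ih =>
    simp only [List.foldl_cons, List.filter_cons]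
    obtain ⟨hk0, hklen⟩ := hg k List.mem_cons_self
    have hset : PySem.List.pySetD bs (g k) (PySem.List.pyGetD bs (g k) [] ++ [k])
        = bs.set (g k).toNat (PySem.List.pyGetD bs (g k) [] ++ [k]) :=
      PySem.List.pySetD_of_nonneg _ _ hk0
    have hlen' : (bs.set (g k).toNat (PySem.List.pyGetD bs (g k) [] ++ [k])).length = bs.length := by
      rw [List.length_set]
    rw [hset, ih _ (by intro x hx; rw [hlen']; exact hg x (List.mem_cons_of_mem _ hx))]
    by_cases hkn : g k = n
    · rw [show (g k == n) = true from by rw [beq_iff_eq]; exact hkn]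
      have hnn : n.toNat < bs.length := by omega
      rw [PySem.List.pyGetD_of_nonneg _ _ hn,
        List.getD_eq_getElem _ _ (by rw [List.length_set]; exact hnn)]
      rw [show (g k).toNat = n.toNat from by rw [hkn]]
      rw [List.getElem_set_self, PySem.List.pyGetD_of_nonneg _ _ hn,
        PySem.List.pyGetD_of_nonneg _ _ hk0, hkn]
      rw [List.getD_eq_getElem _ _ hnn]
      simp
    · rw [show (g k == n) = false from by rw [beq_eq_false_iff_ne]; exact hkn]
      congr 1
      rw [PySem.List.pyGetD_of_nonneg _ _ hn, PySem.List.pyGetD_of_nonneg _ _ hn]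
      by_cases hnlen : n.toNat < bs.length
      · rw [List.getD_eq_getElem _ _ (by rw [List.length_set]; exact hnlen),
          List.getElem_set_ne (by omega), ← List.getD_eq_getElem _ _ hnlen]
      · have h1 : (bs.set (g k).toNat (PySem.List.pyGetD bs (g k) [] ++ [k])).getD n.toNat []
            = ([] : List Int) := List.getD_eq_default _ _ (by rw [List.length_set]; omega)
        have h2 : bs.getD n.toNat [] = ([] : List Int) := List.getD_eq_default _ _ (by omega)
        rw [h1, h2]

-- ---------- partition permutation: the buckets exactly cover the letters ----------

lemma perm_flatMap_filter (f : Int → Int) (ns : List Int) :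
    ∀ (l : List Int), ns.Nodup → (∀ x ∈ l, f x ∈ ns) →
    (ns.flatMap (fun n => l.filter (fun x => f x == n))).Perm l := by
  induction ns with
  | nil =>
    intro l _ hf
    have : l = [] := List.eq_nil_iff_forall_not_mem.2 (fun x hx => by simpa using hf x hx)
    simp [this]
  | cons n ns' ih =>
    intro l hnd hf
    rw [List.flatMap_cons]
    have hstep : ∀ n' ∈ ns', l.filter (fun x => f x == n')
        = (l.filter (fun x => !(f x == n))).filter (fun x => f x == n') := by
      intro n' hn'
      rw [List.filter_filter]
      apply List.filter_congr
      intro x hx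
      by_cases h1 : (f x == n) = true
      · have h2 : (f x == n') = false := by
          rw [beq_eq_false_iff_ne]
          intro h'
          have hn2 : f x = n := beq_iff_eq.1 h1
          have heq : n = n' := hn2.symm.trans h'
          exact (List.nodup_cons.1 hnd).1 (heq ▸ hn')
        simp [h1, h2]
      · rw [Bool.not_eq_true] at h1
        simp [h1]
    have hmap : ns'.map (fun n' => l.filter (fun x => f x == n'))
        = ns'.map (fun n' => (l.filter (fun x => !(f x == n))).filter (fun x => f x == n')) :=
      List.map_congr_left hstep
    have hflat : ns'.flatMap (fun n' => l.filter (fun x => f x == n'))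
        = ns'.flatMap (fun n' => (l.filter (fun x => !(f x == n))).filter (fun x => f x == n')) := by
      rw [List.flatMap_def, List.flatMap_def, hmap]
    rw [hflat]
    have hf' : ∀ x ∈ l.filter (fun x => !(f x == n)), f x ∈ ns' := by
      intro x hx
      have hmem := List.mem_of_mem_filter hx
      have hpred := List.of_mem_filter hx
      rcases List.mem_cons.1 (hf x hmem) with h | h
      · exfalso
        rw [h] at hpred
        simp at hpred
      · exact h
    have hperm' := ih (l.filter (fun x => !(f x == n))) (List.nodup_cons.1 hnd).2 hf'
    exact List.Perm.trans (hperm'.append_left _) (List.filter_append_perm _ l)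

-- ---------- the visiting order pvYs: permutation of 0..25, pairwise in pvR ----------

lemma countdown_nodup (m : Int) : (PySem.List.pyRange m (-1) (-1)).Nodup := by
  rw [PySem.List.pyRange_neg_one_eq_reverse]
  exact List.nodup_reverse.2 (PySem.List.nodup_pyRange_one _ _)

lemma countdown_pairwise_gt (m : Int) :
    (PySem.List.pyRange m (-1) (-1)).Pairwise (fun a b => b < a) := by
  rw [PySem.List.pyRange_neg_one_eq_reverse, List.pairwise_reverse]
  exact PySem.List.pairwise_lt_pyRange_one _ _

lemma pvCnt_nonneg (cs : List Char) (k : Int) : 0 ≤ pvCnt cs k := by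
  unfold pvCnt; positivity

lemma pvCnt_le_pvM (cs : List Char) (k : Int) (h0 : 0 ≤ k) (h26 : k < 26) :
    pvCnt cs k ≤ pvM cs := by
  apply (pvM_facts cs).2
  unfold pvCounts pvCnt
  exact List.mem_map.2 ⟨k.toNat, List.mem_range.2 (by omega), rfl⟩

lemma ys_perm (cs : List Char) (m : Int) (hup : ∀ k : Int, 0 ≤ k → k < 26 → pvCnt cs k ≤ m) :
    (pvYs cs m).Perm (PySem.List.pyRange 0 26 1) := by
  unfold pvYs
  apply perm_flatMap_filter (pvCnt cs) _ _ (countdown_nodup m)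
  intro x hx
  obtain ⟨hx0, hx26⟩ := PySem.List.mem_pyRange_one.1 hx
  rw [PySem.List.mem_pyRange_neg_one]
  exact ⟨by have := pvCnt_nonneg cs x; omega, hup x hx0 hx26⟩

lemma ys_pairwise (cs : List Char) (m : Int) :
    (pvYs cs m).Pairwise (fun k k' =>
      pvR (pvChar k.toNat, pvCnt cs k) (pvChar k'.toNat, pvCnt cs k')) := by
  unfold pvYs
  rw [List.pairwise_flatMap]
  constructor
  · intro n _
    have hpw : ((PySem.List.pyRange 0 26 1).filter (fun k => pvCnt cs k == n)).Pairwise (· < ·) :=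
      (PySem.List.pairwise_lt_pyRange_one 0 26).filter _
    refine hpw.imp_of_mem ?_
    intro a b ha hb hab
    have hca : pvCnt cs a = n := by have := List.of_mem_filter ha; simpa using this
    have hcb : pvCnt cs b = n := by have := List.of_mem_filter hb; simpa using this
    obtain ⟨ha0, ha26⟩ := PySem.List.mem_pyRange_one.1 (List.mem_of_mem_filter ha)
    obtain ⟨hb0, hb26⟩ := PySem.List.mem_pyRange_one.1 (List.mem_of_mem_filter hb)
    right
    refine ⟨by rw [hca, hcb], ?_⟩
    exact pvChar_lt a.toNat (by omega) b.toNat (by omega) (by omega)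
  · refine (countdown_pairwise_gt m).imp ?_
    intro n n' hlt x hx y hy
    have hcx : pvCnt cs x = n := by have := List.of_mem_filter hx; simpa using this
    have hcy : pvCnt cs y = n' := by have := List.of_mem_filter hy; simpa using this
    left
    rw [hcx, hcy]
    exact hlt

-- ---------- A's sorted list IS the bucket traversal ----------

lemma rs_eq_ys (cs : List Char) (m : Int) (hup : ∀ k : Int, 0 ≤ k → k < 26 → pvCnt cs k ≤ m) :
    pvRs cs = (pvYs cs m).map (fun k => (pvChar k.toNat, pvCnt cs k)) := by
  apply List.Perm.eq_of_pairwise (le := pvR)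
  · intro a b _ _ h1 h2
    exfalso
    rcases h1 with h1 | ⟨h1e, h1c⟩ <;> rcases h2 with h2 | ⟨h2e, h2c⟩
    · omega
    · omega
    · omega
    · exact lt_asymm h1c h2c
  · exact rs_pairwise cs
  · rw [List.pairwise_map]
    exact ys_pairwise cs m
  · have h2 := (ys_perm cs m hup).map (fun k => (pvChar k.toNat, pvCnt cs k))
    have h3 : (PySem.List.pyRange 0 26 1).map (fun k => (pvChar k.toNat, pvCnt cs k))
        = pvLetters.map (fun x => (x, (cs.count x : Int))) := by
      rw [PySem.List.pyRange_one, List.map_map, pvLetters_eq_map_range, List.map_map]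
      apply List.map_congr_left
      intro j hj
      simp only [Function.comp]
      have hto : ((0 : Int) + (j : Nat)).toNat = j := by omega
      rw [hto]
      unfold pvCnt
      rw [show ((0 : Int) + (j : Nat)).toNat = j from by omega]
    rw [h3] at h2
    exact (PySem.List.sorted_perm _ _ _).trans h2.symm

-- ---------- B's scatter loop ----------

lemma scatter_len (ys : List Int) : ∀ (st : List (List Char) × Int),
    ((ys.foldl (fun st k =>
      (PySem.List.pySetD st.1 k [PySem.List.pyGetD pvCommon st.2 'A'], st.2 + 1)) st).1).length
      = st.1.length := by
  induction ys with
  | nil => intro st; rfl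
  | cons k t ih =>
    intro st
    simp only [List.foldl_cons]
    rw [ih]
    simp [PySem.List.length_pySetD]

lemma scatter_getD (ys : List Int) : ∀ (out : List (List Char)) (r : Int), out.length = 26 →
    (∀ k ∈ ys, 0 ≤ k ∧ k < 26) → ys.Nodup → ∀ j : Nat, j < 26 →
    ((ys.foldl (fun st k =>
        (PySem.List.pySetD st.1 k [PySem.List.pyGetD pvCommon st.2 'A'], st.2 + 1)) (out, r)).1).getD j []
      = if (j : Int) ∈ ys
        then [PySem.List.pyGetD pvCommon (r + (List.idxOf ((j : Int)) ys : Nat)) 'A']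
        else out.getD j [] := by
  induction ys with
  | nil => intro out r _ _ _ j _; simp
  | cons k t ih =>
    intro out r hlen hmem hnd j hj
    obtain ⟨hk0, hk26⟩ := hmem k List.mem_cons_self
    simp only [List.foldl_cons]
    rw [PySem.List.pySetD_of_nonneg _ _ hk0]
    rw [ih _ _ (by rw [List.length_set]; exact hlen)
      (fun x hx => hmem x (List.mem_cons_of_mem _ hx)) (List.nodup_cons.1 hnd).2 j hj]
    by_cases hjk : (j : Int) = k
    · subst hjk
      have hjt : ((j : Int) : Int) ∉ t := (List.nodup_cons.1 hnd).1
      rw [if_neg hjt, if_pos List.mem_cons_self]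
      have hto : ((j : Int)).toNat = j := by omega
      rw [hto]
      rw [List.getD_eq_getElem _ _ (by rw [List.length_set]; omega),
        List.getElem_set_self _]
      rw [List.idxOf_cons]
      simp
    · have hcond : ((j : Int) ∈ k :: t) = ((j : Int) ∈ t) := by
        simp [List.mem_cons, hjk]
      by_cases hmt : (j : Int) ∈ t
      · rw [if_pos hmt, if_pos (List.mem_cons_of_mem _ hmt)]
        rw [List.idxOf_cons, show (k == ((j : Int))) = false from by
          rw [beq_eq_false_iff_ne]; exact fun h => hjk h.symm]
        simp only [cond_false]
        have harith : r + ((List.idxOf ((j : Int)) t + 1 : Nat) : Int)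
            = r + 1 + ((List.idxOf ((j : Int)) t : Nat) : Int) := by push_cast; ring
        rw [harith]
      · rw [if_neg hmt, if_neg (by
          rw [List.mem_cons]
          rintro (h | h)
          · exact hjk h
          · exact hmt h)]
        have hne : j ≠ k.toNat := by omega
        rw [List.getD_eq_getElem _ _ (by rw [List.length_set]; omega),
          List.getElem_set_ne (by omega), ← List.getD_eq_getElem _ _ (by omega)]

-- folding bucket by bucket is folding the concatenation
lemma foldl_buckets {σ : Type} (g : Int → List Int) (f : σ → Int → σ) (ns : List Int) :
    ∀ (init : σ), ns.foldl (fun st n => (g n).foldl f st) init = (ns.flatMap g).foldl f init := by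
  induction ns with
  | nil => intro init; rfl
  | cons n t ih =>
    intro init
    rw [List.flatMap_cons, List.foldl_append, List.foldl_cons, ih]

-- index of a letter is the index of its slot in the visiting order
lemma idxOf_map_pvChar (ys : List Int) (hmem : ∀ k ∈ ys, 0 ≤ k ∧ k < 26) (j : Nat) (hj : j < 26) :
    List.idxOf (pvChar j) (ys.map (fun k => pvChar k.toNat)) = List.idxOf ((j : Int)) ys := by
  induction ys with
  | nil => rfl
  | cons k t ih =>
    obtain ⟨hk0, hk26⟩ := hmem k List.mem_cons_self
    rw [List.map_cons, List.idxOf_cons, List.idxOf_cons]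
    by_cases hkj : k = (j : Int)
    · rw [show (k == ((j : Int))) = true from by rw [beq_iff_eq]; exact hkj,
        show (pvChar k.toNat == pvChar j) = true from by
          rw [beq_iff_eq]; congr 1; omega]
      rfl
    · rw [show (k == ((j : Int))) = false from by rw [beq_eq_false_iff_ne]; exact hkj,
        show (pvChar k.toNat == pvChar j) = false from by
          rw [beq_eq_false_iff_ne]
          intro h
          exact hkj (by have := pvChar_inj k.toNat (by omega) j hj h; omega)]
      simp only [cond_false]
      rw [ih (fun x hx => hmem x (List.mem_cons_of_mem _ hx))]

-- flatten of singleton lists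
lemma flatten_map_singleton {α β : Type} (l : List α) (f : α → β) :
    (l.map (fun x => [f x])).flatten = l.map f := by
  induction l with
  | nil => rfl
  | cons x t ih => simp [ih]

lemma pyGetD_pvCounts (cs : List Char) (k : Int) (h0 : 0 ≤ k) (h26 : k < 26) :
    PySem.List.pyGetD (pvCounts cs) k 0 = pvCnt cs k := by
  rw [PySem.List.pyGetD_of_nonneg _ _ h0]
  unfold pvCounts pvCnt
  rw [List.getD_eq_getElem _ _ (by simp; omega), List.getElem_map, List.getElem_range]

lemma getD_map_const {α β : Type} (l : List α) (b : β) (n : Nat) :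
    (l.map (fun _ => b)).getD n b = b := by
  rcases lt_or_ge n (l.map (fun _ => b)).length with h | h
  · rw [List.getD_eq_getElem _ _ h, List.getElem_map]
  · rw [List.getD_eq_default _ _ h]

-- B's whole pipeline, as a map over the alphabet slots
set_option maxHeartbeats 1000000 in
lemma B_form (cypher : String) :
    generate_cipher_alt cypher = String.ofList ((List.range 26).map
      (fun (j : Nat) => PySem.List.pyGetD pvCommon
        (((List.idxOf ((j : Nat) : Int) (pvYs cypher.toList (pvM cypher.toList)) : Nat)) : Int) 'A')) := by
  simp only [generate_cipher_alt]
  rw [counts_eq cypher.toList]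
  set cs := cypher.toList with hcs
  set m := (PySem.List.max? (pvCounts cs) (fun x => x)).getD 0 with hmdef
  have hmM : m = pvM cs := hmdef.trans rfl
  have hm0 : 0 ≤ m := by rw [hmM]; exact (pvM_facts cs).1
  have hup : ∀ k : Int, 0 ≤ k → k < 26 → pvCnt cs k ≤ m := by
    intro k h1 h2; rw [hmM]; exact pvCnt_le_pvM cs k h1 h2
  -- the bucket array
  set BK := (PySem.List.pyRange 0 26 1).foldl (fun bs k =>
      PySem.List.pySetD bs (PySem.List.pyGetD (pvCounts cs) k 0)
        (PySem.List.pyGetD bs (PySem.List.pyGetD (pvCounts cs) k 0) []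
          ++ [k])) ((PySem.List.pyRange 0 (m + 1) 1).map (fun _ => ([] : List Int))) with hBK
  have hbucket : ∀ n ∈ PySem.List.pyRange m (-1) (-1),
      PySem.List.pyGetD BK n [] = (PySem.List.pyRange 0 26 1).filter (fun k => pvCnt cs k == n) := by
    intro n hn
    obtain ⟨hn1, hn2⟩ := PySem.List.mem_pyRange_neg_one.1 hn
    have hn0 : 0 ≤ n := by omega
    have hlen0 : (((PySem.List.pyRange 0 (m + 1) 1).map (fun _ => ([] : List Int))).length : Int)
        = m + 1 := by
      rw [List.length_map, PySem.List.length_pyRange_one]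
      omega
    rw [hBK, bucket_fold _ _ _ ?hg n hn0]
    case hg =>
      intro k hk
      obtain ⟨hk0, hk26⟩ := PySem.List.mem_pyRange_one.1 hk
      rw [pyGetD_pvCounts cs k hk0 hk26, hlen0]
      have := pvCnt_nonneg cs k
      have := hup k hk0 hk26
      omega
    rw [PySem.List.pyGetD_of_nonneg _ _ hn0, getD_map_const]
    rw [List.nil_append]
    apply List.filter_congr
    intro k hk
    obtain ⟨hk0, hk26⟩ := PySem.List.mem_pyRange_one.1 hk
    rw [pyGetD_pvCounts cs k hk0 hk26]
  -- the nested loop is a single fold over the visiting order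
  rw [foldl_buckets (fun n => PySem.List.pyGetD BK n [])
    (fun st k => (PySem.List.pySetD st.1 k [PySem.List.pyGetD pvCommon st.2 'A'], st.2 + 1))
    (PySem.List.pyRange m (-1) (-1))]
  have hflat : (PySem.List.pyRange m (-1) (-1)).flatMap (fun n => PySem.List.pyGetD BK n [])
      = pvYs cs m := by
    unfold pvYs
    rw [List.flatMap_def, List.flatMap_def, List.map_congr_left hbucket]
  rw [hflat]
  -- facts about the visiting order
  have hysperm := ys_perm cs m hup
  have hysmem : ∀ k ∈ pvYs cs m, 0 ≤ k ∧ k < 26 := by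
    intro k hk
    exact PySem.List.mem_pyRange_one.1 (hysperm.mem_iff.1 hk)
  have hysnd : (pvYs cs m).Nodup := hysperm.nodup_iff.2 (PySem.List.nodup_pyRange_one _ _)
  -- the filled slots
  have hfin : ((pvYs cs m).foldl (fun st k =>
        (PySem.List.pySetD st.1 k [PySem.List.pyGetD pvCommon st.2 'A'], st.2 + 1))
        (List.replicate 26 ([] : List Char), 0)).1
      = (List.range 26).map (fun j =>
          [PySem.List.pyGetD pvCommon ((List.idxOf ((j : Nat) : Int) (pvYs cs m) : Nat) : Int) 'A']) := by
    apply List.ext_getElem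
    · rw [scatter_len, List.length_replicate, List.length_map, List.length_range]
    · intro j h1 h2
      have hj : j < 26 := by simpa using h2
      have hjm : ((j : Nat) : Int) ∈ pvYs cs m := by
        apply hysperm.mem_iff.2
        rw [PySem.List.mem_pyRange_one]
        omega
      rw [← List.getD_eq_getElem _ [] h1,
        scatter_getD (pvYs cs m) _ 0 (by rw [List.length_replicate]) hysmem hysnd j hj,
        if_pos hjm, List.getElem_map, List.getElem_range, zero_add]
  rw [hfin, flatten_map_singleton, hmM]

set_option maxHeartbeats 1000000 in
theorem generate_cipher_spec : Claim_equal_generate_cipher := by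
  intro cypher _
  unfold Spec_generate_cipher
  rw [A_form, B_form]
  set cs := cypher.toList
  rw [pvLetters_eq_map_range, List.map_map]
  apply congrArg
  apply List.map_congr_left
  intro j hj
  have hj26 : j < 26 := List.mem_range.1 hj
  simp only [Function.comp]
  rw [PySem.List.pyGetD_natCast]
  suffices h : pvIdx (pvRs cs) (pvChar j) = List.idxOf ((j : Nat) : Int) (pvYs cs (pvM cs)) by
    rw [h]
  have hup : ∀ k : Int, 0 ≤ k → k < 26 → pvCnt cs k ≤ pvM cs :=
    fun k h1 h2 => pvCnt_le_pvM cs k h1 h2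
  have hys_mem : ∀ k ∈ pvYs cs (pvM cs), 0 ≤ k ∧ k < 26 := by
    intro k hk
    have := (ys_perm cs (pvM cs) hup).mem_iff.1 hk
    exact PySem.List.mem_pyRange_one.1 this
  unfold pvIdx
  rw [rs_eq_ys cs (pvM cs) hup, List.map_map]
  rw [show (Prod.fst ∘ fun k : Int => (pvChar k.toNat, pvCnt cs k))
      = (fun k : Int => pvChar k.toNat) from rfl]
  exact idxOf_map_pvChar _ hys_mem j hj26
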